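-- pv_equiv track=rewrite | github.com/plooshka/Homework | VladislavOvchinnikov/Task4.3.py | split_analog
-- ===== SOURCE A (Python) =====
-- def split_analog(input_str: str, delimiter=" ", number_of_splits=-1) -> list:
--     """The function which works the same as str.split method"""
--
--     start_position_index = 0
--     current_position_index = 0
--     split_string = list()
--
--     for char in input_str:
--         if char == delimiter and number_of_splits != 0:
--             split_string.append(input_str[start_position_index:current_position_index])
--             start_position_index = current_position_index + 1
--             number_of_splits -= 1
--         current_position_index += 1
--     split_string.append(input_str[start_position_index:])
--     return split_string
-- ===== SOURCE B (Python) =====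
-- def split_analog(input_str: str, delimiter=" ", number_of_splits=-1) -> list:
--     """Two-pass variant: first find split positions, then slice."""
--     remaining = number_of_splits
--     positions = []
--     for i, char in enumerate(input_str):
--         if char == delimiter and remaining != 0:
--             positions.append(i)
--             remaining -= 1
--     parts = []
--     start = 0
--     for pos in positions:
--         parts.append(input_str[start:pos])
--         start = pos + 1
--     parts.append(input_str[start:])
--     return parts
-- ===== Notes on version B (the rewrite author's own statement) =====
-- stated objective: alternative
-- what changed: B splits the work into two passes: one pass collects delimiter positions (honouring the remaining-splits counter), a second pass slices the string between consecutive recorded positions; A interleaves matching and slicing in a single scan with running start/current indices.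
import Mathlib
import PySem

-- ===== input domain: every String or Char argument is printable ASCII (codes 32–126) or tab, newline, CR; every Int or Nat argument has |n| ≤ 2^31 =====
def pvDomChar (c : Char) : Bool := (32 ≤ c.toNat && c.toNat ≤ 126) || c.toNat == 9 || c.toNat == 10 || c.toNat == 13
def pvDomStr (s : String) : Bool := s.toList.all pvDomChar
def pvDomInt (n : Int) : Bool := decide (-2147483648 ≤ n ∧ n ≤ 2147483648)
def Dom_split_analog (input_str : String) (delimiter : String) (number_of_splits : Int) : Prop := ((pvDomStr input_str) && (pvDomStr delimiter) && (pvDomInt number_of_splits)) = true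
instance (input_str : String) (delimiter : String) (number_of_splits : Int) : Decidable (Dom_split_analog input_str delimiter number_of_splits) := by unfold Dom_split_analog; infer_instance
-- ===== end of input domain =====

-- B replaces A's single interleaved scan by two passes (find delimiter positions, then slice); alternative decomposition, same cost.

-- ===== PORT A =====
-- A's single loop: state (accumulated parts, start index), cur is the running index, n the remaining split budget.
def splitLoopA (full delim : List Char) (cs : List Char) (start cur n : Int) (acc : List String) :
    List String × Int :=
  match cs with
  | [] => (acc, start)
  | c :: rest =>
    if [c] = delim ∧ n ≠ 0 then
      splitLoopA full delim rest (cur + 1) (cur + 1) (n - 1)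
        (acc ++ [String.ofList (PySem.List.slice full (some start) (some cur))])
    else
      splitLoopA full delim rest start (cur + 1) n acc

def split_analog (input_str : String) (delimiter : String) (number_of_splits : Int) : List String :=
  let full := input_str.toList
  let r := splitLoopA full delimiter.toList full 0 0 number_of_splits []
  r.1 ++ [String.ofList (PySem.List.slice full (some r.2) none)]

-- ===== PORT B =====
-- B pass 1: collect the indices where a split happens, honouring the remaining-splits counter.
def posLoopB (delim : List Char) (l : List (Int × Char)) (remaining : Int) (acc : List Int) : List Int :=
  match l with
  | [] => acc
  | (i, c) :: rest =>
    if [c] = delim ∧ remaining ≠ 0 then posLoopB delim rest (remaining - 1) (acc ++ [i])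
    else posLoopB delim rest remaining acc

-- B pass 2: slice the string between consecutive recorded positions, then the trailing piece.
def buildB (full : List Char) (positions : List Int) (start : Int) (acc : List String) : List String :=
  match positions with
  | [] => acc ++ [String.ofList (PySem.List.slice full (some start) none)]
  | p :: rest =>
    buildB full rest (p + 1) (acc ++ [String.ofList (PySem.List.slice full (some start) (some p))])

def split_analog_alt (input_str : String) (delimiter : String) (number_of_splits : Int) : List String :=
  let full := input_str.toList
  buildB full (posLoopB delimiter.toList (PySem.List.enumerate full 0) number_of_splits []) 0 []

-- ===== PRECONDITION & SPEC =====
def Spec_split_analog (input_str : String) (delimiter : String) (number_of_splits : Int) (out : List String) : Prop := out = split_analog_alt input_str delimiter number_of_splits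
instance (input_str : String) (delimiter : String) (number_of_splits : Int) (out : List String) : Decidable (Spec_split_analog input_str delimiter number_of_splits out) := by unfold Spec_split_analog; infer_instance

-- ===== CLAIM (what is proved, stated in full; the proofs are below) =====
def Claim_equal_split_analog : Prop := ∀ (input_str : String) (delimiter : String) (number_of_splits : Int), Dom_split_analog input_str delimiter number_of_splits → Spec_split_analog input_str delimiter number_of_splits (split_analog input_str delimiter number_of_splits)

-- ===== LEMMAS AND PROOFS =====

-- posLoopB only appends to its accumulator.
theorem posLoopB_acc (delim : List Char) (l : List (Int × Char)) (remaining : Int)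
    (acc : List Int) : posLoopB delim l remaining acc = acc ++ posLoopB delim l remaining [] := by
  induction l generalizing remaining acc with
  | nil => simp [posLoopB]
  | cons p rest ih =>
    obtain ⟨i, c⟩ := p
    simp only [posLoopB]
    split_ifs with h
    · rw [ih (remaining - 1) (acc ++ [i]), ih (remaining - 1) ([] ++ [i])]
      simp
    · exact ih remaining acc

-- The core correspondence: B's two passes produce exactly what A's single loop (plus the
-- trailing append) produces, from any loop state.
theorem key (full delim : List Char) (cs : List Char) (start cur n : Int) (acc : List String) :
    buildB full (posLoopB delim (PySem.List.enumerate cs cur) n []) start acc =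
      (splitLoopA full delim cs start cur n acc).1 ++
        [String.ofList (PySem.List.slice full (some (splitLoopA full delim cs start cur n acc).2) none)] := by
  induction cs generalizing start cur n acc with
  | nil => simp [posLoopB, buildB, splitLoopA, PySem.List.enumerate_nil]
  | cons c rest ih =>
    rw [PySem.List.enumerate_cons]
    simp only [posLoopB, splitLoopA]
    split_ifs with h
    · rw [posLoopB_acc delim _ (n - 1) ([] ++ [cur])]
      simp only [List.nil_append, List.singleton_append, buildB]
      exact ih (cur + 1) (cur + 1) (n - 1) _
    · exact ih start (cur + 1) n acc

-- ===== VERDICT (by name: the statement is the Claim_ definition above) =====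
theorem split_analog_spec : Claim_equal_split_analog := by
  intro input_str delimiter number_of_splits _
  unfold Spec_split_analog split_analog split_analog_alt
  exact (key input_str.toList delimiter.toList input_str.toList 0 0 number_of_splits []).symm
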